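-- pv_equiv track=rewrite | github.com/MrBrantCode/unitest_baseline | mut_generate/mist_train_taco/taco_4571/solution.py | find_strongest_unique_subsequence
-- ===== SOURCE A (Python) =====
-- def find_strongest_unique_subsequence(s: str) -> str:
--     result = ''
--     start = 0
--     for i in range(ord('z'), ord('a') - 1, -1):
--         ch = chr(i)
--         for j in range(start, len(s)):
--             if s[j] == ch:
--                 result += ch
--                 start = j + 1
--                 break
--     return result
-- ===== SOURCE B (Python) =====
-- def find_strongest_unique_subsequence(s: str) -> str:
--     # Index each character's occurrence positions in one pass, then recurse over
--     # letter codes z..a, taking the first indexed position at or past the cursor.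
--     positions = {}
--     for i, ch in enumerate(s):
--         positions.setdefault(ch, []).append(i)
--
--     def go(code, start):
--         if code < ord('a'):
--             return ''
--         ch = chr(code)
--         pos = next((p for p in positions.get(ch, []) if p >= start), None)
--         if pos is None:
--             return go(code - 1, start)
--         return ch + go(code - 1, pos + 1)
--
--     return go(ord('z'), 0)
-- ===== Notes on version B (the rewrite author's own statement) =====
-- stated objective: faster
-- what changed: B builds a one-pass index from each character to its ascending occurrence positions, then recurses over letter codes z..a picking the first indexed position at or past the cursor, instead of A's iterative per-letter rescan of the string from the cursor.
import Mathlib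
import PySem

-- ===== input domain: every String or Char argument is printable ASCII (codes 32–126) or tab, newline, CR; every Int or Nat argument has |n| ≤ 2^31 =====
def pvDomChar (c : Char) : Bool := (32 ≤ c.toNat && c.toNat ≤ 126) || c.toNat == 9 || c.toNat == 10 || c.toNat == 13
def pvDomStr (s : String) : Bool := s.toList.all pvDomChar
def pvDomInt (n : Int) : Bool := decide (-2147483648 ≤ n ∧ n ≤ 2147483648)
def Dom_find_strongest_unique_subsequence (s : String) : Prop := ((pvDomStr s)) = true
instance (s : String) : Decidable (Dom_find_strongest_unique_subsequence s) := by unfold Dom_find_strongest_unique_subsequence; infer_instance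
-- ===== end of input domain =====

-- B builds a one-pass index from each character to its ascending occurrence positions, then
-- recurses over letter codes z..a picking the first indexed position at or past the cursor,
-- instead of A's iterative per-letter rescan of the string from the cursor (objective: faster).


-- ===== PORT A =====
-- inner loop: 'for j in range(start, len(s)): if s[j] == ch: result += ch; start = j + 1; break'
def pvAInner (cs : List Char) (ch : Char) (res : List Char) (start : Int) :
    List Int → List Char × Int
  | [] => (res, start)
  | j :: js =>
    if PySem.List.pyGet? cs j = some ch then (res ++ [ch], j + 1)
    else pvAInner cs ch res start js

def find_strongest_unique_subsequence (s : String) : String :=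
  let cs := s.toList
  -- for i in range(ord('z'), ord('a') - 1, -1); result kept as List Char, returned as a String
  let st := (PySem.List.pyRange 122 96 (-1)).foldl
    (fun (st : List Char × Int) i =>
      let ch := Char.ofNat i.toNat          -- chr(i)
      pvAInner cs ch st.1 st.2 (PySem.List.pyRange st.2 (cs.length : Int) 1))
    ([], 0)
  String.ofList st.1

-- ===== PORT B =====
-- 'positions.setdefault(ch, []).append(i)'  =  positions[ch] = positions.get(ch, []) + [i]
def pvPositions (cs : List Char) : PySem.Dict Char (List Int) :=
  (PySem.List.enumerate cs).foldl (fun d p => d.modify p.2 [] (· ++ [p.1])) PySem.Dict.empty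

-- 'def go(code, start)': recursion on the letter code, encoded by the fuel n = code - 96
-- (base case n = 0 is Python's 'code < ord("a")'); the generator-with-next
-- 'next((p for p in positions.get(ch, []) if p >= start), None)' is List.find?.
def pvGoB (positions : PySem.Dict Char (List Int)) : Nat → Int → List Char
  | 0, _ => []
  | n + 1, start =>
    let ch := Char.ofNat (96 + (n + 1))     -- chr(code)
    match (positions.getD ch []).find? (fun p => decide (start ≤ p)) with
    | none => pvGoB positions n start
    | some p => ch :: pvGoB positions n (p + 1)

def find_strongest_unique_subsequence_alt (s : String) : String :=
  String.ofList (pvGoB (pvPositions s.toList) 26 0)   -- go(ord('z'), 0), 122 = 96 + 26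

-- ===== PRECONDITION & SPEC =====
def Spec_find_strongest_unique_subsequence (s : String) (out : String) : Prop := out = find_strongest_unique_subsequence_alt s
instance (s : String) (out : String) : Decidable (Spec_find_strongest_unique_subsequence s out) := by unfold Spec_find_strongest_unique_subsequence; infer_instance

-- ===== CLAIM (what is proved, stated in full; the proofs are below) =====
def Claim_equal_find_strongest_unique_subsequence : Prop := ∀ (s : String), Dom_find_strongest_unique_subsequence s → Spec_find_strongest_unique_subsequence s (find_strongest_unique_subsequence s)

-- ===== LEMMAS AND PROOFS =====

-- common reference: first (index, char) pair with the right char at position ≥ start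
def pvFind (cs : List Char) (ch : Char) (start : Int) : Option (Int × Char) :=
  (PySem.List.enumerate cs 0).find? (fun p => decide (p.2 = ch ∧ start ≤ p.1))

-- intermediate scan over (index, char) pairs, bridging A's inner loop to pvFind
def pvMInner (ch : Char) (res : List Char) (start : Int) : List (Int × Char) → List Char × Int
  | [] => (res, start)
  | p :: ps => if p.2 = ch ∧ start ≤ p.1 then (res ++ [ch], p.1 + 1) else pvMInner ch res start ps

theorem pvMInner_eq_find (ch : Char) (res : List Char) (start : Int) (l : List (Int × Char)) :
    pvMInner ch res start l
      = match l.find? (fun p => decide (p.2 = ch ∧ start ≤ p.1)) with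
        | none => (res, start)
        | some p => (res ++ [ch], p.1 + 1) := by
  induction l with
  | nil => rfl
  | cons p ps ih =>
    rw [List.find?_cons]
    by_cases h : p.2 = ch ∧ start ≤ p.1
    · rw [decide_eq_true h]
      simp [pvMInner, h]
    · rw [decide_eq_false h]
      simp only [pvMInner, if_neg h, ih]

theorem pvMInner_skip (ch : Char) (res : List Char) (start : Int)
    (ps qs : List (Int × Char)) (h : ∀ p ∈ ps, p.1 < start) :
    pvMInner ch res start (ps ++ qs) = pvMInner ch res start qs := by
  induction ps with
  | nil => rfl
  | cons p ps ih =>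
    have hp : p.1 < start := h p (by simp)
    simp only [List.cons_append, pvMInner]
    rw [if_neg (by rintro ⟨-, h2⟩; omega), ih (fun q hq => h q (by simp [hq]))]

theorem pvMInner_enum_drop (cs : List Char) (ch : Char) (res : List Char) (start : Int) :
    ∀ (m k : Nat), cs.length - k ≤ m → start ≤ (k : Int) →
      pvMInner ch res start (PySem.List.enumerate (cs.drop k) k)
        = pvAInner cs ch res start (PySem.List.pyRange k cs.length 1) := by
  intro m
  induction m with
  | zero =>
    intro k hm _
    have hk : cs.length ≤ k := by omega
    rw [List.drop_eq_nil_of_le hk, PySem.List.pyRange_one_eq_nil (by exact_mod_cast hk)]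
    rfl
  | succ m ih =>
    intro k hm hs
    by_cases hk : k < cs.length
    · rw [List.drop_eq_getElem_cons hk, PySem.List.enumerate_cons,
        PySem.List.pyRange_one_cons (by exact_mod_cast hk)]
      simp only [pvMInner, pvAInner, PySem.List.pyGet?_natCast, List.getElem?_eq_getElem hk]
      by_cases hc : cs[k] = ch
      · rw [if_pos ⟨hc, hs⟩, if_pos (by rw [hc])]
      · rw [if_neg (by simp [hc]), if_neg (by simp [hc])]
        have := ih (k + 1) (by omega) (by push_cast; omega)
        push_cast at this
        rw [← this]
    · have hk' : cs.length ≤ k := by omega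
      rw [List.drop_eq_nil_of_le hk', PySem.List.pyRange_one_eq_nil (by exact_mod_cast hk')]
      rfl

theorem pvA_step_eq_M (cs : List Char) (ch : Char) (res : List Char) (start : Int)
    (h0 : 0 ≤ start) :
    pvAInner cs ch res start (PySem.List.pyRange start (cs.length : Int) 1)
      = pvMInner ch res start (PySem.List.enumerate cs 0) := by
  by_cases hle : start ≤ (cs.length : Int)
  · set t := start.toNat with ht
    have hst : start = (t : Int) := by omega
    have htn : t ≤ cs.length := by omega
    have hsplit : PySem.List.enumerate cs 0
        = PySem.List.enumerate (cs.take t) 0 ++ PySem.List.enumerate (cs.drop t) (t : Int) := by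
      conv_lhs => rw [← List.take_append_drop t cs]
      rw [PySem.List.enumerate_append]
      congr 2
      simp [List.length_take, Nat.min_eq_left htn]
    rw [hsplit, pvMInner_skip _ _ _ _ _ (by
      intro p hp
      rcases (PySem.List.mem_enumerate_iff _ _ _).1 hp with ⟨j, hj, rfl⟩
      simp only [List.length_take, Nat.min_eq_left htn] at hj
      simp only [zero_add]
      rw [hst]; exact_mod_cast hj)]
    rw [pvMInner_enum_drop cs ch res start cs.length t (by omega) (by omega), hst]
  · have : PySem.List.pyRange start (cs.length : Int) 1 = [] :=
      PySem.List.pyRange_one_eq_nil (by omega)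
    rw [this]
    have := pvMInner_skip ch res start (PySem.List.enumerate cs 0) [] (by
      intro p hp
      rcases (PySem.List.mem_enumerate_iff _ _ _).1 hp with ⟨j, hj, rfl⟩
      simp only [zero_add]
      have : (j : Int) < (cs.length : Int) := by exact_mod_cast hj
      omega)
    rw [List.append_nil] at this
    rw [this]
    rfl

theorem pvPositions_getD (ps : List (Int × Char)) (d : PySem.Dict Char (List Int)) (ch : Char) :
    (ps.foldl (fun d p => d.modify p.2 [] (· ++ [p.1])) d).getD ch []
      = d.getD ch [] ++ ps.filterMap (fun p => if p.2 = ch then some p.1 else none) := by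
  induction ps generalizing d with
  | nil => simp
  | cons p ps ih =>
    simp only [List.foldl_cons, ih, List.filterMap_cons]
    by_cases hc : p.2 = ch
    · subst hc
      rw [PySem.Dict.getD_modify_self]
      simp
    · rw [PySem.Dict.getD_modify_of_ne _ _ _ (fun h => hc h.symm)]
      simp [hc]

theorem pvFind_filterMap (ch : Char) (start : Int) (l : List (Int × Char)) :
    (l.filterMap (fun p => if p.2 = ch then some p.1 else none)).find? (fun p => decide (start ≤ p))
      = (l.find? (fun p => decide (p.2 = ch ∧ start ≤ p.1))).map Prod.fst := by
  induction l with
  | nil => rfl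
  | cons p ps ih =>
    rw [List.filterMap_cons]
    by_cases hc : p.2 = ch
    · rw [if_pos hc, List.find?_cons, List.find?_cons]
      by_cases hs : start ≤ p.1
      · rw [decide_eq_true hs, decide_eq_true ⟨hc, hs⟩]
        rfl
      · rw [decide_eq_false hs, decide_eq_false (fun hh => hs hh.2)]
        exact ih
    · rw [if_neg hc, List.find?_cons, decide_eq_false (fun hh => hc hh.1)]
      exact ih

theorem pvB_find (cs : List Char) (ch : Char) (start : Int) :
    ((pvPositions cs).getD ch []).find? (fun p => decide (start ≤ p))
      = (pvFind cs ch start).map Prod.fst := by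
  have he : (PySem.Dict.empty : PySem.Dict Char (List Int)).getD ch [] = [] :=
    PySem.Dict.getD_empty ch []
  unfold pvFind
  rw [pvPositions, pvPositions_getD, he, List.nil_append, pvFind_filterMap]

theorem pvFoldA_eq_goB (cs : List Char) :
    ∀ (n : Nat) (res : List Char) (start : Int), 0 ≤ start →
      ((PySem.List.pyRange (96 + (n : Int)) 96 (-1)).foldl
        (fun (st : List Char × Int) i =>
          pvAInner cs (Char.ofNat i.toNat) st.1 st.2
            (PySem.List.pyRange st.2 (cs.length : Int) 1)) (res, start)).1
        = res ++ pvGoB (pvPositions cs) n start := by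
  intro n
  induction n with
  | zero =>
    intro res start _
    rw [PySem.List.pyRange_neg_one_eq_nil (by norm_num)]
    simp [pvGoB]
  | succ n ih =>
    intro res start h0
    rw [PySem.List.pyRange_neg_one_cons (by push_cast; omega)]
    have harg : (96 + ((n + 1 : Nat) : Int)) - 1 = 96 + (n : Int) := by push_cast; ring
    have hch : (96 + ((n + 1 : Nat) : Int)).toNat = 96 + (n + 1) := by omega
    simp only [List.foldl_cons, harg, hch]
    rw [pvA_step_eq_M cs _ res start h0, pvMInner_eq_find]
    have hsel := pvB_find cs (Char.ofNat (96 + (n + 1))) start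
    cases hfind : pvFind cs (Char.ofNat (96 + (n + 1))) start with
    | none =>
      rw [hfind] at hsel
      simp only [pvFind] at hfind
      rw [hfind]
      simp only [pvGoB, hsel]
      exact ih res start h0
    | some p =>
      rw [hfind] at hsel
      simp only [pvFind] at hfind
      rw [hfind]
      have hp0 : 0 ≤ p.1 := by
        have hmem := List.mem_of_find?_eq_some hfind
        rcases (PySem.List.mem_enumerate_iff _ _ _).1 hmem with ⟨j, hj, rfl⟩
        simp only [zero_add]
        positivity
      simp only [pvGoB, hsel, Option.map_some]
      rw [ih (res ++ [Char.ofNat (96 + (n + 1))]) (p.1 + 1) (by omega)]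
      simp

-- ===== VERDICT (by name: the statement is the Claim_ definition above) =====
theorem find_strongest_unique_subsequence_spec : Claim_equal_find_strongest_unique_subsequence := by
  intro s _
  unfold Spec_find_strongest_unique_subsequence
  unfold find_strongest_unique_subsequence find_strongest_unique_subsequence_alt
  simp only
  have h122 : (122 : Int) = 96 + ((26 : Nat) : Int) := by norm_num
  rw [h122, pvFoldA_eq_goB s.toList 26 [] 0 le_rfl]
  rfl
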